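-- pv_equiv track=rewrite | github.com/rlaxodud214/CodingTest_Kotlin | 프로그래머스/unrated/155652. 둘만의 암호/둘만의 암호.py | solution
-- ===== SOURCE A (Python) =====
-- def solution(s, skip, index):
--     ss = [ord(x)-96 for x in s]         # 아스키 코드 값 변환
--
--     for i in range(len(ss)):
--         count = index
--         while count != 0:
--
--             if ss[i] == 26:
--                 ss[i] = 0
--
--             if(chr(ss[i]+97) not in skip):  # 스킵이 아닌 경우
--                 count -= 1
--
--             ss[i] += 1
--
--     return "".join([chr(x+96) for x in ss])
-- ===== SOURCE B (Python) =====
-- def solution(s, skip, index):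
--     if index == 0:
--         return s
--     allowed = [c for c in "abcdefghijklmnopqrstuvwxyz" if c not in skip]
--     m = len(allowed)
--     out = []
--     for c in s:
--         o = ord(c)
--         pre = [chr(k) for k in range(o + 1, 123) if chr(k) not in skip]
--         if index <= len(pre):
--             out.append(pre[index - 1])
--         else:
--             out.append(allowed[(index - len(pre) - 1) % m])
--     return "".join(out)
-- ===== Notes on version B (the rewrite author's own statement) =====
-- stated objective: faster
-- what changed: A advances every character step by step, running its while-loop index times per character; B computes each output character directly by position: it lists the non-skip codes once and reads the answer off by index into the remaining-codes list or by modular arithmetic over the allowed alphabet.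
-- outside the precondition, e.g. on solution('{', '', 1): A returns '|', B returns 'a'; on solution(' ', 'abcdefghijklmnopqrstuvwxyz', 1): A returns '!', B returns '!'
import Mathlib
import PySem

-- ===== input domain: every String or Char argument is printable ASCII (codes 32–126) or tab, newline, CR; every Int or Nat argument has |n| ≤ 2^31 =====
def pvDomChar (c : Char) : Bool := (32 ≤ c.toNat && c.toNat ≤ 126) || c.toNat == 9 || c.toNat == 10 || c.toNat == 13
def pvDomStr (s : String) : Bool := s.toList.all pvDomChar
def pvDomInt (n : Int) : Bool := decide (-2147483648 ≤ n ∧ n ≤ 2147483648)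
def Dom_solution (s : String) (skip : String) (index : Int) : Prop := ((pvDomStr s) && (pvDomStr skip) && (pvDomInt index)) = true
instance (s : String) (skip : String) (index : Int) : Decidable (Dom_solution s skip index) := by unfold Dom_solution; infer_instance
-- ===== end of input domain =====

-- B replaces A's per-character step-by-step advance (index loop iterations per character)
-- with direct positional lookup in the once-computed list of non-skip codes (faster).

-- ===== PORT A =====
-- A's inner `while count != 0` loop; the fuel argument only makes the recursion total
-- (on Pre_ inputs it is large enough, proved below).  `chr(x) not in skip` on a
-- one-character string is exactly character membership.
def loopA (skipL : List Char) (fuel : Nat) (v : Int) (count : Int) : Int :=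
  if count = 0 then v
  else
    match fuel with
    | 0 => v
    | fuel' + 1 =>
      let v1 : Int := if v = 26 then 0 else v
      let count' : Int := if skipL.contains (Char.ofNat (v1 + 97).toNat) then count else count - 1
      loopA skipL fuel' (v1 + 1) count'

def solution (s : String) (skip : String) (index : Int) : String :=
  let ss : List Int := s.toList.map (fun x => (x.toNat : Int) - 96)
  let ss2 : List Int := ss.map (fun v => loopA skip.toList ((26 * (index + 5)).toNat) v index)
  String.ofList (ss2.map (fun x => Char.ofNat (x + 96).toNat))

-- ===== PORT B =====
def solution_alt (s : String) (skip : String) (index : Int) : String :=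
  if index = 0 then s
  else
    let allowed : List Char := "abcdefghijklmnopqrstuvwxyz".toList.filter (fun ch => !(skip.toList.contains ch))
    let out : List Char := s.toList.map (fun c =>
      let o : Int := (c.toNat : Int)
      let pre : List Char := ((PySem.List.pyRange (o + 1) 123 1).filter
          (fun k => !(skip.toList.contains (Char.ofNat k.toNat)))).map (fun k => Char.ofNat k.toNat)
      if index ≤ (pre.length : Int) then (PySem.List.pyGet? pre (index - 1)).getD 'a'
      else (PySem.List.pyGet? allowed (PySem.Int.mod (index - (pre.length : Int) - 1) ((allowed.length : Int)))).getD 'a')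
    String.ofList out

-- ===== PRECONDITION & SPEC =====
-- Pre_ restricts to the task's natural domain (lowercase message, at least one unskipped
-- letter, positive index): it excludes negative index and an all-letters skip (there A loops
-- forever) and message characters above 'z' ('{'..'~'), where A returns accidental unwrapped
-- characters; index = 0 and the empty message are kept (A returns s unchanged there).
def Pre_solution (s : String) (skip : String) (index : Int) : Prop :=
  s = "" ∨ index = 0 ∨
    (1 ≤ index ∧ s.toList.all (fun c => decide (c.toNat ≤ 122)) = true ∧
      "abcdefghijklmnopqrstuvwxyz".toList.any (fun c => !(skip.toList.contains c)) = true)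
instance (s : String) (skip : String) (index : Int) : Decidable (Pre_solution s skip index) := by
  unfold Pre_solution; infer_instance

def pvWitness_solution : String × String × Int := ("ab", "b", 3)

def Spec_solution (s : String) (skip : String) (index : Int) (out : String) : Prop := out = solution_alt s skip index
instance (s : String) (skip : String) (index : Int) (out : String) : Decidable (Spec_solution s skip index out) := by unfold Spec_solution; infer_instance

-- ===== CLAIM (what is proved, stated in full; the proofs are below) =====
def Claim_equal_solution : Prop := ∀ (s : String) (skip : String) (index : Int), Dom_solution s skip index → Pre_solution s skip index → Spec_solution s skip index (solution s skip index)

-- ===== LEMMAS AND PROOFS =====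

-- Proof-side view of A's loop on raw character CODES (w = v + 96): candidate codes advance
-- w+1, w+2, …, wrapping 122 ('z') → 97 ('a'), counting candidates not in skip.
def nonskip (skipL : List Char) (k : Int) : Bool := !(skipL.contains (Char.ofNat k.toNat))

def nextc (w : Int) : Int := if w = 122 then 97 else w + 1

def loopC (skipL : List Char) (fuel : Nat) (w : Int) (count : Int) : Int :=
  if count = 0 then w
  else
    match fuel with
    | 0 => w
    | fuel' + 1 =>
      loopC skipL fuel' (nextc w) (if nonskip skipL (nextc w) then count - 1 else count)

-- non-skip codes strictly after w, up to 'z'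
def preL (skipL : List Char) (w : Int) : List Int :=
  (PySem.List.pyRange (w + 1) 123 1).filter (nonskip skipL)

-- non-skip letter codes
def acodes (skipL : List Char) : List Int :=
  (PySem.List.pyRange 97 123 1).filter (nonskip skipL)

-- closed form for the final code
def specC (skipL : List Char) (w : Int) (idx : Nat) : Int :=
  if idx ≤ (preL skipL w).length then (preL skipL w).getD (idx - 1) 0
  else (acodes skipL).getD ((idx - (preL skipL w).length - 1) % (acodes skipL).length) 0

lemma loopA_eq_loopC (skipL : List Char) : ∀ (fuel : Nat) (v count : Int),
    loopA skipL fuel v count = loopC skipL fuel (v + 96) count - 96 := by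
  intro fuel
  induction fuel with
  | zero => intro v count; unfold loopA loopC; by_cases h : count = 0 <;> simp [h]
  | succ fuel ih =>
    intro v count
    unfold loopA loopC
    by_cases h : count = 0
    · simp [h]
    · simp only [h, if_false]
      by_cases hv : v = 26
      · have h1 : nextc (v + 96) = 97 := by unfold nextc; simp [hv]
        simp only [hv, if_pos, nonskip]
        have := ih 1 (if (skipL.contains (Char.ofNat ((0:Int) + 97).toNat)) then count else count - 1)
        simpa [nonskip] using by
          rw [show ((1:Int) + 96) = 97 by norm_num] at this
          by_cases hc : skipL.contains (Char.ofNat ((0:Int) + 97).toNat) <;>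
            simp [show ((0:Int)+97) = 97 by norm_num] at this ⊢ <;> exact this
      · have h1 : nextc (v + 96) = v + 97 := by
          unfold nextc
          have : v + 96 ≠ 122 := by omega
          simp [this]; ring
        simp only [hv, h1, nonskip]
        have := ih (v + 1) (if (skipL.contains (Char.ofNat (v + 97).toNat)) then count else count - 1)
        rw [show v + 1 + 96 = v + 97 by ring] at this
        by_cases hc : skipL.contains (Char.ofNat (v + 97).toNat) <;> simp at this ⊢ <;> exact this

lemma preL_cons_hit (skipL : List Char) {w : Int} (h : w < 122) (hns : nonskip skipL (w + 1) = true) :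
    preL skipL w = (w + 1) :: preL skipL (w + 1) := by
  unfold preL
  rw [PySem.List.pyRange_one_cons (by omega)]
  simp [hns]

lemma preL_cons_skip (skipL : List Char) {w : Int} (h : w < 122) (hns : nonskip skipL (w + 1) = false) :
    preL skipL w = preL skipL (w + 1) := by
  unfold preL
  rw [PySem.List.pyRange_one_cons (by omega)]
  simp [hns]

lemma preL_z (skipL : List Char) : preL skipL 122 = [] := by
  unfold preL
  rw [PySem.List.pyRange_one_eq_nil (by norm_num)]
  rfl

lemma acodes_hit (skipL : List Char) (hns : nonskip skipL 97 = true) :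
    acodes skipL = 97 :: preL skipL 97 := by
  unfold acodes preL
  rw [PySem.List.pyRange_one_cons (by norm_num)]
  simp [hns]

lemma acodes_skip (skipL : List Char) (hns : nonskip skipL 97 = false) :
    acodes skipL = preL skipL 97 := by
  unfold acodes preL
  rw [PySem.List.pyRange_one_cons (by norm_num)]
  simp [hns]

lemma specC_step (skipL : List Char) {w : Int} (hw : w ≤ 122) {idx : Nat} (h1 : 1 ≤ idx) :
    specC skipL w idx =
      if nonskip skipL (nextc w) then
        (if idx = 1 then nextc w else specC skipL (nextc w) (idx - 1))
      else specC skipL (nextc w) idx := by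
  by_cases hw' : w = 122
  · subst hw'
    have hk : nextc (122:Int) = 97 := by unfold nextc; simp
    rw [hk]
    have hP : (preL skipL 122).length = 0 := by rw [preL_z]; rfl
    by_cases hns : nonskip skipL 97 = true
    · have ha := acodes_hit skipL hns
      have hm' : (acodes skipL).length = (preL skipL 97).length + 1 := by rw [ha]; simp
      by_cases h2 : idx = 1
      · subst h2
        simp only [hns, if_true]
        unfold specC
        rw [hP]
        simp only [Nat.le_zero, show (1:Nat) ≠ 0 by decide, ha]
        simp
      · simp only [hns, if_true, if_neg h2]
        unfold specC
        rw [hP]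
        have h1' : ¬ (idx ≤ 0) := by omega
        rw [if_neg h1']
        by_cases h3 : idx - 1 ≤ (preL skipL 97).length
        · rw [if_pos h3]
          have hlt : idx - 0 - 1 < (acodes skipL).length := by omega
          rw [Nat.mod_eq_of_lt hlt, ha]
          have : idx - 0 - 1 = (idx - 1 - 1) + 1 := by omega
          rw [this, List.getD_cons_succ]
        · rw [if_neg h3]
          have e1 : idx - 0 - 1 = (idx - 1 - (preL skipL 97).length - 1) + (acodes skipL).length := by omega
          rw [e1, Nat.add_mod_right]
    · have hns' : nonskip skipL 97 = false := by simpa using hns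
      have ha := acodes_skip skipL hns'
      have hm' : (acodes skipL).length = (preL skipL 97).length := by rw [ha]
      simp only [hns', Bool.false_eq_true, if_false]
      unfold specC
      rw [hP]
      have h1' : ¬ (idx ≤ 0) := by omega
      rw [if_neg h1']
      by_cases h3 : idx ≤ (preL skipL 97).length
      · rw [if_pos h3]
        have hlt : idx - 0 - 1 < (acodes skipL).length := by omega
        rw [Nat.mod_eq_of_lt hlt, ha]
        have e : idx - 0 - 1 = idx - 1 := by omega
        rw [e]
      · rw [if_neg h3]
        have e1 : idx - 0 - 1 = (idx - (preL skipL 97).length - 1) + (acodes skipL).length := by omega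
        rw [e1, Nat.add_mod_right, ha]
  · have hwlt : w < 122 := by omega
    have hk : nextc w = w + 1 := by unfold nextc; simp [hw']
    rw [hk]
    by_cases hns : nonskip skipL (w + 1) = true
    · have hp := preL_cons_hit skipL hwlt hns
      simp only [hns, if_true]
      by_cases h2 : idx = 1
      · subst h2
        rw [if_pos rfl]
        unfold specC
        rw [hp]
        simp
      · rw [if_neg h2]
        unfold specC
        rw [hp]
        simp only [List.length_cons]
        by_cases h3 : idx - 1 ≤ (preL skipL (w+1)).length
        · rw [if_pos (by omega), if_pos h3]
          have e : idx - 1 = (idx - 1 - 1) + 1 := by omega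
          conv_lhs => rw [e]
          rw [List.getD_cons_succ]
        · rw [if_neg (by omega), if_neg h3]
          have e1 : idx - ((preL skipL (w+1)).length + 1) - 1 = idx - 1 - (preL skipL (w+1)).length - 1 := by omega
          rw [e1]
    · have hns' : nonskip skipL (w + 1) = false := by simpa using hns
      have hp := preL_cons_skip skipL hwlt hns'
      simp only [hns', Bool.false_eq_true, if_false]
      unfold specC
      rw [hp]

lemma loopC_eq_specC (skipL : List Char) : ∀ (fuel : Nat) (w : Int) (idx : Nat),
    w ≤ 122 → 1 ≤ idx → 1 ≤ (acodes skipL).length →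
    (122 - w).toNat + 1 + 26 * (idx - (preL skipL w).length) ≤ fuel →
    loopC skipL fuel w (idx : Int) = specC skipL w idx := by
  intro fuel
  induction fuel with
  | zero => intro w idx hw h1 hm hfuel; omega
  | succ fuel ih =>
    intro w idx hw h1 hm hfuel
    have hidx0 : ((idx : Int)) ≠ 0 := by omega
    unfold loopC
    rw [if_neg hidx0]
    have hknext : nextc w ≤ 122 := by unfold nextc; split <;> omega
    rw [specC_step skipL hw h1]
    by_cases hns : nonskip skipL (nextc w) = true
    · simp only [hns, if_true]
      by_cases h2 : idx = 1
      · subst h2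
        rw [if_pos rfl]
        norm_num
        unfold loopC
        simp
      · rw [if_neg h2]
        have e : (idx : Int) - 1 = ((idx - 1 : Nat) : Int) := by omega
        rw [e]
        apply ih (nextc w) (idx - 1) hknext (by omega) hm
        by_cases hw' : w = 122
        · subst hw'
          have hk : nextc (122:Int) = 97 := by unfold nextc; simp
          rw [hk]
          have hns97 : nonskip skipL 97 = true := by rw [hk] at hns; exact hns
          have hP : (preL skipL 122).length = 0 := by rw [preL_z]; rfl
          have hm2 : (acodes skipL).length = (preL skipL 97).length + 1 := by
            rw [acodes_hit skipL hns97]; simp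
          rw [hP] at hfuel
          omega
        · have hk : nextc w = w + 1 := by unfold nextc; simp [hw']
          rw [hk]
          rw [hk] at hns
          have hp : (preL skipL w).length = (preL skipL (w+1)).length + 1 := by
            rw [preL_cons_hit skipL (by omega) hns]; simp
          omega
    · have hns' : nonskip skipL (nextc w) = false := by simpa using hns
      simp only [hns', Bool.false_eq_true, if_false]
      apply ih (nextc w) idx hknext h1 hm
      by_cases hw' : w = 122
      · subst hw'
        have hk : nextc (122:Int) = 97 := by unfold nextc; simp
        rw [hk]
        have hns97 : nonskip skipL 97 = false := by rw [hk] at hns'; exact hns'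
        have hP : (preL skipL 122).length = 0 := by rw [preL_z]; rfl
        have hm2 : (acodes skipL).length = (preL skipL 97).length := by
          rw [acodes_skip skipL hns97]
        rw [hP] at hfuel
        omega
      · have hk : nextc w = w + 1 := by unfold nextc; simp [hw']
        rw [hk]
        rw [hk] at hns'
        have hp : (preL skipL w).length = (preL skipL (w+1)).length := by
          rw [preL_cons_skip skipL (by omega) hns']
        omega

lemma alphabet_eq : "abcdefghijklmnopqrstuvwxyz".toList
    = (PySem.List.pyRange 97 123 1).map (fun k => Char.ofNat k.toNat) := by decide

lemma allowed_eq (skip : String) :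
    "abcdefghijklmnopqrstuvwxyz".toList.filter (fun ch => !(skip.toList.contains ch))
      = (acodes skip.toList).map (fun k => Char.ofNat k.toNat) := by
  rw [alphabet_eq, List.filter_map]
  rfl

lemma acodes_len_pos (skip : String)
    (hex : ∃ c ∈ "abcdefghijklmnopqrstuvwxyz".toList, c ∉ skip.toList) :
    1 ≤ (acodes skip.toList).length := by
  obtain ⟨c, hc, hns⟩ := hex
  have hmem : c ∈ "abcdefghijklmnopqrstuvwxyz".toList.filter (fun ch => !(skip.toList.contains ch)) :=
    List.mem_filter.mpr ⟨hc, by simpa using hns⟩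
  rw [allowed_eq] at hmem
  have := List.length_pos_of_mem hmem
  simpa using this

-- per-character agreement on the main branch
lemma char_eq (skip : String) (index : Int) (idx : Nat) (hidx : index = (idx : Int)) (h1 : 1 ≤ idx)
    (hm : 1 ≤ (acodes skip.toList).length) (c : Char) (hc : c.toNat ≤ 122) :
    Char.ofNat ((loopA skip.toList ((26 * (index + 5)).toNat) ((c.toNat : Int) - 96) index) + 96).toNat
      = (let o : Int := (c.toNat : Int)
         let pre : List Char := ((PySem.List.pyRange (o + 1) 123 1).filter
             (fun k => !(skip.toList.contains (Char.ofNat k.toNat)))).map (fun k => Char.ofNat k.toNat)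
         if index ≤ (pre.length : Int) then
           (PySem.List.pyGet? pre (index - 1)).getD 'a'
         else
           (PySem.List.pyGet? ("abcdefghijklmnopqrstuvwxyz".toList.filter (fun ch => !(skip.toList.contains ch)))
             (PySem.Int.mod (index - (pre.length : Int) - 1)
               ((("abcdefghijklmnopqrstuvwxyz".toList.filter (fun ch => !(skip.toList.contains ch))).length : Int)))).getD 'a') := by
  set skipL := skip.toList with hskipL
  set w : Int := (c.toNat : Int) with hwdef
  have hw : w ≤ 122 := by omega
  -- A side: move to loopC, then to the closed form
  rw [loopA_eq_loopC]
  have e1 : w - 96 + 96 = w := by ring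
  rw [e1]
  have e2 : loopC skipL ((26 * (index + 5)).toNat) w index - 96 + 96
      = loopC skipL ((26 * (index + 5)).toNat) w index := by ring
  rw [e2, hidx]
  rw [loopC_eq_specC skipL _ w idx hw h1 hm (by omega)]
  -- B side
  have hpre : ((PySem.List.pyRange (w + 1) 123 1).filter
      (fun k => !(skipL.contains (Char.ofNat k.toNat)))) = preL skipL w := rfl
  simp only [hpre]
  rw [allowed_eq]
  simp only [List.length_map]
  by_cases hb : (idx : Int) ≤ ((preL skipL w).length : Int)
  · rw [if_pos hb]
    have hble : idx ≤ (preL skipL w).length := by omega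
    have hlt : idx - 1 < (preL skipL w).length := by omega
    unfold specC
    rw [if_pos hble]
    have e3 : (idx : Int) - 1 = ((idx - 1 : Nat) : Int) := by omega
    rw [e3, PySem.List.pyGet?_natCast]
    rw [List.getElem?_eq_getElem (by simpa using hlt)]
    simp only [Option.getD_some, List.getElem_map]
    rw [List.getD_eq_getElem _ _ hlt]
  · rw [if_neg hb]
    have hgt : (preL skipL w).length < idx := by omega
    unfold specC
    rw [if_neg (by omega)]
    have e4 : (idx : Int) - ((preL skipL w).length : Int) - 1
        = ((idx - (preL skipL w).length - 1 : Nat) : Int) := by omega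
    rw [e4, PySem.Int.mod_natCast, PySem.List.pyGet?_natCast]
    have hlt2 : (idx - (preL skipL w).length - 1) % (acodes skipL).length < (acodes skipL).length :=
      Nat.mod_lt _ (by omega)
    rw [List.getElem?_eq_getElem (by simpa using hlt2)]
    simp only [Option.getD_some, List.getElem_map]
    rw [List.getD_eq_getElem _ _ hlt2]

-- ===== VERDICT (by name: the statement is the Claim_ definition above) =====
theorem solution_spec : Claim_equal_solution := by
  unfold Claim_equal_solution
  intro s skip index _hdom hpre
  unfold Spec_solution
  rcases hpre with hs | h0 | ⟨h1, hchars, hex⟩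
  · subst hs
    have hnil : ("" : String).toList = [] := rfl
    unfold solution solution_alt
    rw [hnil]
    by_cases h : index = 0
    · rw [if_pos h]; rfl
    · rw [if_neg h]; rfl
  · subst h0
    unfold solution solution_alt
    rw [if_pos rfl]
    simp only [List.map_map]
    have : ∀ c ∈ s.toList,
        (Char.ofNat ((loopA skip.toList ((26 * ((0:Int) + 5)).toNat) ((c.toNat : Int) - 96) 0) + 96).toNat) = c := by
      intro c _
      have hz : loopA skip.toList ((26 * ((0:Int) + 5)).toNat) ((c.toNat : Int) - 96) 0
          = (c.toNat : Int) - 96 := by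
        unfold loopA; simp
      rw [hz]
      have : (c.toNat : Int) - 96 + 96 = (c.toNat : Int) := by ring
      rw [this]
      simp [Char.ofNat_toNat]
    calc String.ofList (s.toList.map _) = String.ofList (s.toList.map id) :=
          congrArg String.ofList (List.map_congr_left (fun c h => this c h))
      _ = s := by rw [List.map_id, String.ofList_toList]
  · have hne : index ≠ 0 := by omega
    have hex' : ∃ c ∈ "abcdefghijklmnopqrstuvwxyz".toList, c ∉ skip.toList := by
      simpa using hex
    have hchars' : ∀ c ∈ s.toList, c.toNat ≤ 122 := by
      simpa using hchars
    have hm : 1 ≤ (acodes skip.toList).length := acodes_len_pos skip hex'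
    have hidx : index = ((index.toNat : Nat) : Int) := by omega
    have h1' : 1 ≤ index.toNat := by omega
    unfold solution solution_alt
    rw [if_neg hne]
    simp only [List.map_map]
    refine congrArg String.ofList (List.map_congr_left ?_)
    intro c hcmem
    have hc : c.toNat ≤ 122 := hchars' c hcmem
    exact char_eq skip index index.toNat hidx h1' hm c hc
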